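-- pv_equiv track=rewrite | github.com/EndaltsevaAR/YandexTaskPy | lectures/_06_binary_search/lecture.py | right_search
-- ===== SOURCE A (Python) =====
-- def right_search(w, h, n):
--     left = 0
--     right = max(w, h)
--     while left != right:
--         m = (left + right + 1) // 2
--         if (w // m) * (h // m) >= n:
--             left = m
--         else:
--             right = m - 1
--     return left
-- ===== SOURCE B (Python) =====
-- def right_search(w, h, n):
--     M = max(w, h)
--     if M <= 0:
--         return 0
--     # candidate sizes: the places where (w // m, h // m) can change value,
--     # plus M itself; every maximal feasible size is among them
--     cands = [M]
--     q = 1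
--     while q * q <= w:
--         cands.append(q)
--         cands.append(w // q)
--         q += 1
--     q = 1
--     while q * q <= h:
--         cands.append(q)
--         cands.append(h // q)
--         q += 1
--     best = 0
--     for m in cands:
--         if 0 < m and m <= M and (w // m) * (h // m) >= n and best < m:
--             best = m
--     return best
-- ===== Notes on version B (the rewrite author's own statement) =====
-- stated objective: alternative
-- what changed: Replaces the interval bisection with an enumeration of the O(sqrt(w)+sqrt(h)) candidate sizes at which (w//m, h//m) can change value, returning the largest feasible candidate.
-- outside the precondition, e.g. on right_search(-10, 10, -1): A returns 0, B returns 10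
-- crash fix: When max(w,h) == -1 (e.g. w=h=-1) A raises ZeroDivisionError because the midpoint m becomes 0; B returns 0. — e.g. on right_search(-1, -1, 1): A raises ZeroDivisionError, B returns 0
import Mathlib
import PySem

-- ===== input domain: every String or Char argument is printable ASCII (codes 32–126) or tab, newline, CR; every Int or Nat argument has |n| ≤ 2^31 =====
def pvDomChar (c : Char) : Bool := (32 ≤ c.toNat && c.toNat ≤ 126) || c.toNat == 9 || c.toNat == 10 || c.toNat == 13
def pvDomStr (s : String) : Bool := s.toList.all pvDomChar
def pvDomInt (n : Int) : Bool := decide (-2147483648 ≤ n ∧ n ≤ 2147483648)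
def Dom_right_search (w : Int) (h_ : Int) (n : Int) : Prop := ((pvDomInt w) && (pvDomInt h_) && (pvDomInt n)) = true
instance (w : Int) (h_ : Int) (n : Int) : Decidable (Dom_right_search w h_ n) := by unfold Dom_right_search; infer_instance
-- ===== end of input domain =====

-- B replaces A's bisection by enumerating the candidate sizes where (w//m, h//m) changes value (an alternative algorithm, not claimed faster); return-value equivalence on non-negative dimensions.


-- ===== PORT A =====
-- A's while-loop as fuel recursion (the fuel only makes the loop total; inside Pre_ it never runs out, see rsLoopA_spec).
def rsLoopA (w h_ n : Int) : Nat → Int → Int → Int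
  | 0, left, _ => left
  | fuel+1, left, right =>
    if left = right then left
    else
      let m := PySem.Int.floordiv (left + right + 1) 2
      if n ≤ PySem.Int.floordiv w m * PySem.Int.floordiv h_ m then
        rsLoopA w h_ n fuel m right
      else
        rsLoopA w h_ n fuel left (m - 1)

def right_search (w : Int) (h_ : Int) (n : Int) : Int :=
  rsLoopA w h_ n ((max w h_).toNat + 1) 0 (max w h_)

-- ===== PORT B =====
-- Source B's candidate-building 'while q * q <= w' loop: tail recursion on an accumulator list
-- (cands.append(q); cands.append(w // q)), reversed at the end to the Python append order;
-- the fuel only makes it total, it stops at q*q > w long before.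
def rsCands (w : Int) : Nat → Int → List Int → List Int
  | 0, _, acc => acc.reverse
  | fuel+1, q, acc =>
    if q * q ≤ w then rsCands w fuel (q + 1) (PySem.Int.floordiv w q :: q :: acc)
    else acc.reverse

def right_search_alt (w : Int) (h_ : Int) (n : Int) : Int :=
  if max w h_ ≤ 0 then 0
  else
    ((max w h_) :: (rsCands w (w.toNat + 1) 1 [] ++ rsCands h_ (h_.toNat + 1) 1 [])).foldl
      (fun best m =>
        if 0 < m ∧ m ≤ max w h_ ∧ n ≤ PySem.Int.floordiv w m * PySem.Int.floordiv h_ m ∧ best < m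
        then m else best) 0

-- ===== PRECONDITION & SPEC =====
-- Pre_ excludes negative dimensions: there A's bisection predicate is not monotone, so the value A returns on
-- mixed-sign inputs is an accident of the bisection, and with both dimensions negative A raises ZeroDivisionError
-- or loops forever.
def Pre_right_search (w : Int) (h_ : Int) (n : Int) : Prop := 0 ≤ w ∧ 0 ≤ h_
instance (w : Int) (h_ : Int) (n : Int) : Decidable (Pre_right_search w h_ n) := by unfold Pre_right_search; infer_instance
def pvWitness_right_search : Int × Int × Int := (6, 6, 4)

-- When max(w,h) == -1 (e.g. w = h = -1) A raises ZeroDivisionError because the midpoint m becomes 0; B returns 0.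
def Raises_right_search (w : Int) (h_ : Int) (n : Int) : Prop := max w h_ = -1
instance (w : Int) (h_ : Int) (n : Int) : Decidable (Raises_right_search w h_ n) := by unfold Raises_right_search; infer_instance
def pvRaiseWitness_right_search : Int × Int × Int := (-1, -1, 1)
def pvRaiseWitnessOut_right_search : Int := 0

def Spec_right_search (w : Int) (h_ : Int) (n : Int) (out : Int) : Prop := out = right_search_alt w h_ n
instance (w : Int) (h_ : Int) (n : Int) (out : Int) : Decidable (Spec_right_search w h_ n out) := by unfold Spec_right_search; infer_instance

-- ===== CLAIM (what is proved, stated in full; the proofs are below) =====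
def Claim_equal_right_search : Prop := ∀ (w : Int) (h_ : Int) (n : Int), Dom_right_search w h_ n → Pre_right_search w h_ n → Spec_right_search w h_ n (right_search w h_ n)
def Claim_raises_right_search : Prop := (∀ (w : Int) (h_ : Int) (n : Int), Dom_right_search w h_ n → Raises_right_search w h_ n → ¬ Pre_right_search w h_ n) ∧ (Dom_right_search (pvRaiseWitness_right_search.1) (pvRaiseWitness_right_search.2.1) (pvRaiseWitness_right_search.2.2) ∧ Raises_right_search (pvRaiseWitness_right_search.1) (pvRaiseWitness_right_search.2.1) (pvRaiseWitness_right_search.2.2) ∧ right_search_alt (pvRaiseWitness_right_search.1) (pvRaiseWitness_right_search.2.1) (pvRaiseWitness_right_search.2.2) = pvRaiseWitnessOut_right_search)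

-- ===== LEMMAS AND PROOFS =====

-- A result is "good" if it is 0 or a feasible size, and no larger size (up to max w h_) is feasible.
def RSGood (w h_ n L : Int) : Prop :=
  0 ≤ L ∧ L ≤ max w h_ ∧
  (L = 0 ∨ n ≤ PySem.Int.floordiv w L * PySem.Int.floordiv h_ L) ∧
  (∀ m, L < m → m ≤ max w h_ → ¬ n ≤ PySem.Int.floordiv w m * PySem.Int.floordiv h_ m)

lemma fdiv_anti (w : Int) (hw : 0 ≤ w) {a b : Int} (ha : 0 < a) (hab : a ≤ b) :
    PySem.Int.floordiv w b ≤ PySem.Int.floordiv w a := by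
  rw [PySem.Int.floordiv_eq_ediv_of_pos (by omega), PySem.Int.floordiv_eq_ediv_of_pos ha]
  have h1 : w = ((w.toNat : Int)) := (Int.toNat_of_nonneg hw).symm
  have h2 : a = ((a.toNat : Int)) := (Int.toNat_of_nonneg (by omega)).symm
  have h3 : b = ((b.toNat : Int)) := (Int.toNat_of_nonneg (by omega)).symm
  rw [h1, h2, h3, ← Int.natCast_div, ← Int.natCast_div]
  exact_mod_cast Nat.div_le_div_left (by omega) (by omega)

lemma fdiv_nonneg' (w : Int) (hw : 0 ≤ w) {a : Int} (ha : 0 < a) :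
    0 ≤ PySem.Int.floordiv w a := by
  rw [PySem.Int.floordiv_eq_ediv_of_pos ha]
  exact Int.ediv_nonneg hw (le_of_lt ha)

lemma pred_anti (w h_ n : Int) (hw : 0 ≤ w) (hh : 0 ≤ h_) {a b : Int} (ha : 0 < a) (hab : a ≤ b)
    (hb : n ≤ PySem.Int.floordiv w b * PySem.Int.floordiv h_ b) :
    n ≤ PySem.Int.floordiv w a * PySem.Int.floordiv h_ a := by
  have hb0 : (0:Int) < b := by omega
  have h1 : PySem.Int.floordiv w b ≤ PySem.Int.floordiv w a := fdiv_anti w hw ha hab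
  have h2 : PySem.Int.floordiv h_ b ≤ PySem.Int.floordiv h_ a := fdiv_anti h_ hh ha hab
  have hwb : 0 ≤ PySem.Int.floordiv w b := fdiv_nonneg' w hw hb0
  have hhb : 0 ≤ PySem.Int.floordiv h_ b := fdiv_nonneg' h_ hh hb0
  calc n ≤ PySem.Int.floordiv w b * PySem.Int.floordiv h_ b := hb
    _ ≤ PySem.Int.floordiv w a * PySem.Int.floordiv h_ a :=
      mul_le_mul h1 h2 hhb (le_trans hwb h1)

lemma rsLoopA_spec (w h_ n : Int) (hw : 0 ≤ w) (hh : 0 ≤ h_) :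
    ∀ (fuel : Nat) (left right : Int), 0 ≤ left → left ≤ right → right ≤ max w h_ →
    (left = 0 ∨ n ≤ PySem.Int.floordiv w left * PySem.Int.floordiv h_ left) →
    (∀ m, right < m → m ≤ max w h_ → ¬ n ≤ PySem.Int.floordiv w m * PySem.Int.floordiv h_ m) →
    right - left < (fuel : Int) →
    RSGood w h_ n (rsLoopA w h_ n fuel left right) := by
  intro fuel
  induction fuel with
  | zero => intro left right h0 hlr _ _ _ hf; exfalso; omega
  | succ f ih =>
    intro left right h0 hlr hrM hleft hright hf
    rw [rsLoopA]
    by_cases he : left = right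
    · rw [if_pos he]
      exact ⟨h0, by omega, hleft, fun m h1 h2 => hright m (by omega) h2⟩
    · rw [if_neg he]
      have hlt : left < right := lt_of_le_of_ne hlr he
      set m := PySem.Int.floordiv (left + right + 1) 2 with hm
      have hmb : left < m ∧ m ≤ right := by
        rw [hm, PySem.Int.floordiv_eq_ediv_of_pos (by omega : (0:Int) < 2)]
        omega
      by_cases hp : n ≤ PySem.Int.floordiv w m * PySem.Int.floordiv h_ m
      · rw [if_pos hp]
        exact ih m right (by omega) (by omega) hrM (Or.inr hp) hright (by omega)
      · rw [if_neg hp]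
        refine ih left (m - 1) h0 (by omega) (by omega) hleft ?_ (by omega)
        intro m' hm1 hm2
        by_cases hmr : right < m'
        · exact hright m' hmr hm2
        · intro hPm'
          exact hp (pred_anti w h_ n hw hh (by omega) (by omega) hPm')

-- elements already collected survive the candidate loop
lemma rsCands_mono (w : Int) :
    ∀ (fuel : Nat) (q : Int) (acc : List Int) (x : Int),
      x ∈ acc → x ∈ rsCands w fuel q acc := by
  intro fuel
  induction fuel with
  | zero => intro q acc x hx; rw [rsCands]; exact List.mem_reverse.mpr hx
  | succ f ih =>
    intro q acc x hx
    rw [rsCands]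
    by_cases hq : q * q ≤ w
    · rw [if_pos hq]
      exact ih _ _ _ (by simp [hx])
    · rw [if_neg hq]
      exact List.mem_reverse.mpr hx

-- with enough fuel, every p ≥ q with p*p ≤ w gets itself and w//p collected
lemma rsCands_mem (w : Int) :
    ∀ (fuel : Nat) (q : Int) (acc : List Int), 1 ≤ q → w + 1 ≤ q + (fuel : Int) →
      ∀ p : Int, q ≤ p → p * p ≤ w →
        p ∈ rsCands w fuel q acc ∧ PySem.Int.floordiv w p ∈ rsCands w fuel q acc := by
  intro fuel
  induction fuel with
  | zero =>
    intro q acc hq1 hfu p hqp hpw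
    exfalso
    have hp1 : 1 ≤ p := by omega
    have hpf : w + 1 ≤ p := by push_cast at hfu; omega
    nlinarith
  | succ f ih =>
    intro q acc hq1 hfu p hqp hpw
    rw [rsCands]
    by_cases hq : q * q ≤ w
    · rw [if_pos hq]
      rcases eq_or_lt_of_le hqp with rfl | hlt
      · exact ⟨rsCands_mono w _ _ _ _ (by simp), rsCands_mono w _ _ _ _ (by simp)⟩
      · exact ih (q + 1) _ (by omega) (by push_cast at hfu ⊢; omega) p (by omega) hpw
    · rw [if_neg hq]
      exfalso
      apply hq
      calc q * q ≤ p * p := by nlinarith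
        _ ≤ w := hpw

lemma fdiv_mul_le' (w : Int) (hw : 0 ≤ w) {q : Int} (hq : 0 < q) :
    PySem.Int.floordiv w q * q ≤ w := by
  rw [PySem.Int.floordiv_eq_ediv_of_pos hq, mul_comm]
  have h1 := Int.ediv_add_emod w q
  have h2 := Int.emod_nonneg w (ne_of_gt hq)
  linarith

lemma le_fdiv (w : Int) {a c : Int} (hc : 0 < c) (h : a * c ≤ w) :
    a ≤ PySem.Int.floordiv w c := by
  rw [PySem.Int.floordiv_eq_ediv_of_pos hc]
  exact (Int.le_ediv_iff_mul_le hc).mpr h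

-- the mathematical core: any feasible size is dominated by a feasible CANDIDATE size
lemma rs_cover (w h_ n : Int) (hw : 0 ≤ w) (hh : 0 ≤ h_) (m : Int) (hm1 : 1 ≤ m)
    (hmM : m ≤ max w h_) (hP : n ≤ PySem.Int.floordiv w m * PySem.Int.floordiv h_ m) :
    ∃ c, c ∈ (max w h_) :: (rsCands w (w.toNat + 1) 1 [] ++ rsCands h_ (h_.toNat + 1) 1 [])
      ∧ m ≤ c ∧ c ≤ max w h_ ∧ n ≤ PySem.Int.floordiv w c * PySem.Int.floordiv h_ c := by
  have hM1 : 1 ≤ max w h_ := le_trans hm1 hmM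
  by_cases hn : n ≤ 0
  · refine ⟨max w h_, ?_, hmM, le_refl _, ?_⟩
    · exact List.mem_cons_self
    · have := mul_nonneg (fdiv_nonneg' w hw (by omega : (0:Int) < max w h_))
        (fdiv_nonneg' h_ hh (by omega : (0:Int) < max w h_))
      omega
  · have hn1 : 1 ≤ n := by omega
    have hm0 : (0:Int) < m := hm1
    have hq1 : 0 ≤ PySem.Int.floordiv w m := fdiv_nonneg' w hw hm0
    have hq2 : 0 ≤ PySem.Int.floordiv h_ m := fdiv_nonneg' h_ hh hm0
    set q1 := PySem.Int.floordiv w m with hq1d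
    set q2 := PySem.Int.floordiv h_ m with hq2d
    have hq1p : 1 ≤ q1 := by nlinarith
    have hq2p : 1 ≤ q2 := by nlinarith
    set a := PySem.Int.floordiv w q1 with had
    set b := PySem.Int.floordiv h_ q2 with hbd
    have hma : m ≤ a := le_fdiv w (by omega) (by have := fdiv_mul_le' w hw hm0; rw [← hq1d] at this; linarith [mul_comm m q1])
    have hmb : m ≤ b := le_fdiv h_ (by omega) (by have := fdiv_mul_le' h_ hh hm0; rw [← hq2d] at this; linarith [mul_comm m q2])
    have ha0 : 0 ≤ a := by omega
    have hb0 : 0 ≤ b := by omega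
    have haq1 : a * q1 ≤ w := fdiv_mul_le' w hw (by omega)
    have hbq2 : b * q2 ≤ h_ := fdiv_mul_le' h_ hh (by omega)
    have haw : a ≤ w := by nlinarith
    have hbh : b ≤ h_ := by nlinarith
    -- membership of a in the w-loop, of b in the h-loop
    have hwfuel : w + 1 ≤ 1 + ((w.toNat + 1 : Nat) : Int) := by push_cast; omega
    have hhfuel : h_ + 1 ≤ 1 + ((h_.toNat + 1 : Nat) : Int) := by push_cast; omega
    have hamem : a ∈ rsCands w (w.toNat + 1) 1 [] := by
      by_cases hqq : q1 * q1 ≤ w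
      · have := rsCands_mem w (w.toNat + 1) 1 [] (le_refl 1) hwfuel q1 hq1p hqq
        rw [← had] at this
        exact this.2
      · have haq : a ≤ q1 := by nlinarith
        have haa : a * a ≤ w := by nlinarith
        exact (rsCands_mem w (w.toNat + 1) 1 [] (le_refl 1) hwfuel a (by omega) haa).1
    have hbmem : b ∈ rsCands h_ (h_.toNat + 1) 1 [] := by
      by_cases hqq : q2 * q2 ≤ h_
      · have := rsCands_mem h_ (h_.toNat + 1) 1 [] (le_refl 1) hhfuel q2 hq2p hqq
        rw [← hbd] at this
        exact this.2
      · have hbq : b ≤ q2 := by nlinarith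
        have hbb : b * b ≤ h_ := by nlinarith
        exact (rsCands_mem h_ (h_.toNat + 1) 1 [] (le_refl 1) hhfuel b (by omega) hbb).1
    -- the dominating candidate
    have hkey : ∀ c : Int, 0 < c → c ≤ a → c ≤ b →
        n ≤ PySem.Int.floordiv w c * PySem.Int.floordiv h_ c := by
      intro c hc hca hcb
      have h1 : q1 ≤ PySem.Int.floordiv w c := le_fdiv w hc (by nlinarith)
      have h2 : q2 ≤ PySem.Int.floordiv h_ c := le_fdiv h_ hc (by nlinarith)
      calc n ≤ q1 * q2 := hP
        _ ≤ PySem.Int.floordiv w c * PySem.Int.floordiv h_ c :=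
          mul_le_mul h1 h2 hq2 (le_trans hq1 h1)
    rcases le_total a b with hab | hab
    · refine ⟨a, List.mem_cons_of_mem _ (List.mem_append_left _ hamem), hma, ?_,
        hkey a (by omega) (le_refl a) hab⟩
      exact le_trans haw (le_max_left w h_)
    · refine ⟨b, List.mem_cons_of_mem _ (List.mem_append_right _ hbmem), hmb, ?_,
        hkey b (by omega) hab (le_refl b)⟩
      exact le_trans hbh (le_max_right w h_)

lemma fold_max_spec (w h_ n : Int) :
    ∀ (l : List Int) (best : Int), 0 ≤ best →
      (best = 0 ∨ (0 < best ∧ best ≤ max w h_ ∧ n ≤ PySem.Int.floordiv w best * PySem.Int.floordiv h_ best)) →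
      best ≤ l.foldl (fun best m => if 0 < m ∧ m ≤ max w h_ ∧ n ≤ PySem.Int.floordiv w m * PySem.Int.floordiv h_ m ∧ best < m then m else best) best ∧
      (l.foldl (fun best m => if 0 < m ∧ m ≤ max w h_ ∧ n ≤ PySem.Int.floordiv w m * PySem.Int.floordiv h_ m ∧ best < m then m else best) best = 0 ∨
        (0 < l.foldl (fun best m => if 0 < m ∧ m ≤ max w h_ ∧ n ≤ PySem.Int.floordiv w m * PySem.Int.floordiv h_ m ∧ best < m then m else best) best ∧
         l.foldl (fun best m => if 0 < m ∧ m ≤ max w h_ ∧ n ≤ PySem.Int.floordiv w m * PySem.Int.floordiv h_ m ∧ best < m then m else best) best ≤ max w h_ ∧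
         n ≤ PySem.Int.floordiv w (l.foldl (fun best m => if 0 < m ∧ m ≤ max w h_ ∧ n ≤ PySem.Int.floordiv w m * PySem.Int.floordiv h_ m ∧ best < m then m else best) best) * PySem.Int.floordiv h_ (l.foldl (fun best m => if 0 < m ∧ m ≤ max w h_ ∧ n ≤ PySem.Int.floordiv w m * PySem.Int.floordiv h_ m ∧ best < m then m else best) best))) ∧
      ∀ x ∈ l, (0 < x ∧ x ≤ max w h_ ∧ n ≤ PySem.Int.floordiv w x * PySem.Int.floordiv h_ x) →
        x ≤ l.foldl (fun best m => if 0 < m ∧ m ≤ max w h_ ∧ n ≤ PySem.Int.floordiv w m * PySem.Int.floordiv h_ m ∧ best < m then m else best) best := by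
  intro l
  induction l with
  | nil =>
    intro best h0 hq
    simp only [List.foldl_nil]
    exact ⟨le_refl _, hq, by intro x hx; cases hx⟩
  | cons m l ih =>
    intro best h0 hq
    simp only [List.foldl_cons]
    by_cases hc : 0 < m ∧ m ≤ max w h_ ∧ n ≤ PySem.Int.floordiv w m * PySem.Int.floordiv h_ m ∧ best < m
    · rw [if_pos hc]
      obtain ⟨hr1, hr2, hr3⟩ := ih m (by omega) (Or.inr ⟨hc.1, hc.2.1, hc.2.2.1⟩)
      refine ⟨by omega, hr2, ?_⟩
      intro x hx hxq
      rcases List.mem_cons.mp hx with rfl | hxl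
      · omega
      · exact hr3 x hxl hxq
    · rw [if_neg hc]
      obtain ⟨hr1, hr2, hr3⟩ := ih best h0 hq
      refine ⟨hr1, hr2, ?_⟩
      intro x hx hxq
      rcases List.mem_cons.mp hx with rfl | hxl
      · by_cases hb : best < x
        · exact absurd ⟨hxq.1, hxq.2.1, hxq.2.2, hb⟩ hc
        · omega
      · exact hr3 x hxl hxq

lemma alt_good (w h_ n : Int) (hw : 0 ≤ w) (hh : 0 ≤ h_) :
    RSGood w h_ n (right_search_alt w h_ n) := by
  unfold right_search_alt
  by_cases hM : max w h_ ≤ 0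
  · rw [if_pos hM]
    have hM0 : 0 ≤ max w h_ := le_trans hw (le_max_left w h_)
    exact ⟨le_refl 0, by omega, Or.inl rfl, fun m h1 h2 _ => by omega⟩
  · rw [if_neg hM]
    set cands := (max w h_) :: (rsCands w (w.toNat + 1) 1 [] ++ rsCands h_ (h_.toNat + 1) 1 []) with hcd
    obtain ⟨hr1, hr2, hr3⟩ := fold_max_spec w h_ n cands 0 (le_refl 0) (Or.inl rfl)
    set r := cands.foldl (fun best m => if 0 < m ∧ m ≤ max w h_ ∧ n ≤ PySem.Int.floordiv w m * PySem.Int.floordiv h_ m ∧ best < m then m else best) 0 with hrd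
    refine ⟨by omega, ?_, ?_, ?_⟩
    · rcases hr2 with h | h
      · omega
      · exact h.2.1
    · rcases hr2 with h | h
      · exact Or.inl h
      · exact Or.inr h.2.2
    · intro m hm1 hm2 hPm
      have hm0 : 1 ≤ m := by omega
      obtain ⟨c, hcmem, hmc, hcM, hPc⟩ := rs_cover w h_ n hw hh m hm0 hm2 hPm
      have := hr3 c hcmem ⟨by omega, hcM, hPc⟩
      omega

lemma RSGood_unique (w h_ n L1 L2 : Int) (g1 : RSGood w h_ n L1) (g2 : RSGood w h_ n L2) :
    L1 = L2 := by
  obtain ⟨a1, b1, c1, d1⟩ := g1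
  obtain ⟨a2, b2, c2, d2⟩ := g2
  rcases lt_trichotomy L1 L2 with h | h | h
  · exfalso
    rcases c2 with hz | hp
    · omega
    · exact d1 L2 h b2 hp
  · exact h
  · exfalso
    rcases c1 with hz | hp
    · omega
    · exact d2 L1 h b1 hp

-- ===== VERDICT (by name: the statement is the Claim_ definition above) =====
theorem right_search_spec : Claim_equal_right_search := by
  intro w h_ n _ hpre
  obtain ⟨hw, hh⟩ := hpre
  unfold Spec_right_search right_search
  have hM : (0:Int) ≤ max w h_ := le_trans hw (le_max_left w h_)
  have gA : RSGood w h_ n (rsLoopA w h_ n ((max w h_).toNat + 1) 0 (max w h_)) := by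
    refine rsLoopA_spec w h_ n hw hh _ 0 (max w h_) (le_refl 0) hM (le_refl _) (Or.inl rfl)
      (fun m h1 h2 => by omega) ?_
    push_cast
    omega
  exact RSGood_unique w h_ n _ _ gA (alt_good w h_ n hw hh)

@[simp] theorem right_search_raises : Claim_raises_right_search := by
  unfold Claim_raises_right_search
  refine ⟨?_, by decide⟩
  intro w h_ n _ hr hp
  obtain ⟨hw, hh⟩ := hp
  have := le_max_left w h_
  unfold Raises_right_search at hr
  omega
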